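-- pv_equiv track=rewrite | github.com/kytaets/Processing-and-Analysis-of-Text-Data-Labs | Lab-1/task2.py | mask_phone_keep_first_two_digits
-- ===== SOURCE A (Python) =====
-- def mask_phone_keep_first_two_digits(phone: str, mask_char: str = "X") -> str:
--     result = []
--     digit_count = 0
--
--     for ch in phone:
--         if ch.isdigit():
--             digit_count += 1
--             if digit_count <= 2:
--                 result.append(ch)
--             else:
--                 result.append(mask_char)
--         else:
--             result.append(ch)
--
--     return "".join(result)
-- ===== SOURCE B (Python) =====
-- def mask_phone_keep_first_two_digits(phone: str, mask_char: str = "X") -> str: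
--     # phase 1: find the boundary index right after the second digit
--     count = 0
--     boundary = None
--     for i, ch in enumerate(phone):
--         if ch.isdigit():
--             count += 1
--             if count == 2:
--                 boundary = i + 1
--                 break
--     if boundary is None:
--         return phone
--     # phase 2: keep the prefix verbatim, mask digits in the tail
--     tail = "".join(mask_char if ch.isdigit() else ch for ch in phone[boundary:])
--     return phone[:boundary] + tail
-- ===== Notes on version B (the rewrite author's own statement) =====
-- stated objective: alternative
-- what changed: Replaces the single fused loop carrying a digit counter with two phases: a boundary scan that finds the index right after the second digit (early exit, unchanged string if fewer than two digits), then a prefix copy plus a counter-free digit-masking transform of the tail.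
import Mathlib
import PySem

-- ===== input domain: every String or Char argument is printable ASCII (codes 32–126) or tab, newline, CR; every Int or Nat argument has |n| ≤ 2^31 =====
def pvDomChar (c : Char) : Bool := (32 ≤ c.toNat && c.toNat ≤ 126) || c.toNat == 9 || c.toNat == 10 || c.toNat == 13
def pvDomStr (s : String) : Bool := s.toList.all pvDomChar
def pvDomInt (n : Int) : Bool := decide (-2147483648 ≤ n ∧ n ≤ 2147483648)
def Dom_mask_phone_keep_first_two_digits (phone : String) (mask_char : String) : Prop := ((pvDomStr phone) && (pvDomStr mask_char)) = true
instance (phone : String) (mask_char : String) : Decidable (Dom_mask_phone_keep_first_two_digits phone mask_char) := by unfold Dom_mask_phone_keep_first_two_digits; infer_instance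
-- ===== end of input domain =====

-- B replaces A's fused counting loop by a boundary-finding scan plus a counter-free tail transform (alternative decomposition, same cost).

-- ===== PORT A =====
-- the loop of A: state = digit_count (Python int), result built front-to-back
-- ch.isdigit() on a single char → PySem.Chars.isdigit (exact on the ASCII domain)
def pvAGo (mask : List Char) : List Char → Int → List Char
  | [], _ => []
  | c :: cs, dc =>
    if PySem.Chars.isdigit c then
      if dc + 1 ≤ 2 then c :: pvAGo mask cs (dc + 1)
      else mask ++ pvAGo mask cs (dc + 1)
    else c :: pvAGo mask cs dc

def mask_phone_keep_first_two_digits (phone : String) (mask_char : String) : String :=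
  String.ofList (pvAGo mask_char.toList phone.toList 0)

-- ===== PORT B =====
-- phase 1 of B: index right after the second digit (relative offset), none if < 2 digits
def pvBoundary : List Char → Nat → Option Nat
  | [], _ => none
  | c :: cs, count =>
    if PySem.Chars.isdigit c then
      if count + 1 = 2 then some 1
      else (pvBoundary cs (count + 1)).map (· + 1)
    else (pvBoundary cs count).map (· + 1)

-- phase 2 of B: mask every digit in the tail (mask_char may be any string)
def pvMaskTail (mask : List Char) (cs : List Char) : List Char :=
  cs.flatMap (fun c => if PySem.Chars.isdigit c then mask else [c])

def mask_phone_keep_first_two_digits_alt (phone : String) (mask_char : String) : String :=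
  match pvBoundary phone.toList 0 with
  | none => phone
  | some b => String.ofList (phone.toList.take b ++ pvMaskTail mask_char.toList (phone.toList.drop b))

-- ===== PRECONDITION & SPEC =====
def Spec_mask_phone_keep_first_two_digits (phone : String) (mask_char : String) (out : String) : Prop := out = mask_phone_keep_first_two_digits_alt phone mask_char
instance (phone : String) (mask_char : String) (out : String) : Decidable (Spec_mask_phone_keep_first_two_digits phone mask_char out) := by unfold Spec_mask_phone_keep_first_two_digits; infer_instance

-- ===== CLAIM (what is proved, stated in full; the proofs are below) =====
def Claim_equal_mask_phone_keep_first_two_digits : Prop := ∀ (phone : String) (mask_char : String), Dom_mask_phone_keep_first_two_digits phone mask_char → Spec_mask_phone_keep_first_two_digits phone mask_char (mask_phone_keep_first_two_digits phone mask_char)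

-- ===== LEMMAS AND PROOFS =====

-- once A has seen ≥ 2 digits it masks every further digit: exactly B's tail transform
theorem pvAGo_ge_two (mask : List Char) (cs : List Char) (dc : Int) (h : 2 ≤ dc) :
    pvAGo mask cs dc = pvMaskTail mask cs := by
  induction cs generalizing dc with
  | nil => simp [pvAGo, pvMaskTail]
  | cons c cs ih =>
    by_cases hd : PySem.Chars.isdigit c
    · have : ¬ (dc + 1 ≤ 2) := by omega
      simp [pvAGo, hd, this, pvMaskTail, ih (dc + 1) (by omega)]
    · simp [pvAGo, hd, pvMaskTail, ih dc h]

-- the two-phase decomposition agrees with A's fused loop while fewer than 2 digits were seen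
theorem pvAGo_eq_boundary (mask : List Char) (cs : List Char) (count : Nat) (dc : Int)
    (hlt : count < 2) (heq : dc = (count : Int)) :
    pvAGo mask cs dc =
      match pvBoundary cs count with
      | none => cs
      | some b => cs.take b ++ pvMaskTail mask (cs.drop b) := by
  induction cs generalizing count dc with
  | nil => simp [pvAGo, pvBoundary]
  | cons c cs ih =>
    by_cases hd : PySem.Chars.isdigit c
    · have hle : dc + 1 ≤ 2 := by omega
      by_cases h2 : count + 1 = 2
      · have : 2 ≤ dc + 1 := by omega
        simp [pvAGo, hd, hle, pvBoundary, h2, pvAGo_ge_two mask cs (dc + 1) this]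
      · have hlt' : count + 1 < 2 := by omega
        have := ih (count + 1) (dc + 1) hlt' (by omega)
        simp only [pvAGo, hd, if_pos hle, pvBoundary, if_neg h2, this]
        cases pvBoundary cs (count + 1) <;> simp
    · have := ih count dc hlt heq
      simp only [pvAGo, hd, pvBoundary, this]
      cases pvBoundary cs count <;> simp

-- ===== VERDICT (by name: the statement is the Claim_ definition above) =====
theorem mask_phone_keep_first_two_digits_spec : Claim_equal_mask_phone_keep_first_two_digits := by
  intro phone mask_char _
  unfold Spec_mask_phone_keep_first_two_digits
  unfold mask_phone_keep_first_two_digits mask_phone_keep_first_two_digits_alt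
  rw [pvAGo_eq_boundary mask_char.toList phone.toList 0 0 (by omega) rfl]
  cases pvBoundary phone.toList 0 <;> simp [String.ofList_toList]
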